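-- pv_equiv track=rewrite | github.com/ericksamera/paperclip | backend/captures/services/dashboard.py | _tally
-- ===== SOURCE A (Python) =====
-- from collections.abc import Iterable
--
-- def _tally(items: Iterable[str]) -> dict[str, int]:
--     out: dict[str, int] = {}
--     for it in items:
--         key = (it or "").strip()
--         if not key:
--             continue
--         out[key] = out.get(key, 0) + 1
--     return out
-- ===== SOURCE B (Python) =====
-- from collections.abc import Iterable
--
-- def _tally(items: Iterable[str]) -> dict[str, int]:
--     # Two-pass form: collect the cleaned keys, then tally each distinct key by
--     # counting its occurrences in the collected list (no running accumulator).
--     keys = [k for it in items if (k := (it or "").strip())]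
--     out: dict[str, int] = {}
--     for k in keys:
--         if k not in out:
--             out[k] = keys.count(k)
--     return out
-- ===== Notes on version B (the rewrite author's own statement) =====
-- stated objective: alternative
-- what changed: Replaces the one-pass incremental get-and-increment accumulation with a two-pass scheme: first materialise the list of cleaned keys, then assign each key its total keys.count(k) once at its first occurrence.
import Mathlib
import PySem

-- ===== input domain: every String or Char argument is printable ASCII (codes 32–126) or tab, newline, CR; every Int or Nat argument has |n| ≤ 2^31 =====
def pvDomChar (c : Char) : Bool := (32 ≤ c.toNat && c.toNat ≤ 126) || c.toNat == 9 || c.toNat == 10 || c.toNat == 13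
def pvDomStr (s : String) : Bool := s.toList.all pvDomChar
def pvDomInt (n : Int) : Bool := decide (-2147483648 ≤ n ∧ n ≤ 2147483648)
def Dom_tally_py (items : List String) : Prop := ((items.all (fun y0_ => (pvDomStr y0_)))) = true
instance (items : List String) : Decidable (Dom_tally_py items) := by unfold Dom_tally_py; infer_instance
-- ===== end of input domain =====

-- B replaces A's one-pass incremental tally with a two-pass scheme (collect cleaned keys,
-- then count each distinct key in the collected list); alternative decomposition, not faster.


-- ===== PORT A =====
-- for it in items: key = (it or "").strip(); if not key: continue; out[key] = out.get(key, 0) + 1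
def tally_py (items : List String) : List (String × Int) :=
  (items.foldl (fun out it =>
    let key := PySem.Str.strip it
    if key = "" then out
    else out.insert key (out.getD key 0 + 1)) PySem.Dict.empty).items

-- ===== PORT B =====
-- keys = [k for it in items if (k := (it or "").strip())]
-- for k in keys: if k not in out: out[k] = keys.count(k)
def tally_py_alt (items : List String) : List (String × Int) :=
  let keys := (items.map (fun it => PySem.Str.strip it)).filter (fun k => k ≠ "")
  (keys.foldl (fun out k =>
    if out.contains k then out
    else out.insert k (PySem.List.count keys k)) PySem.Dict.empty).items

-- ===== PRECONDITION & SPEC =====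
def Spec_tally_py (items : List String) (out : List (String × Int)) : Prop := out = tally_py_alt items
instance (items : List String) (out : List (String × Int)) : Decidable (Spec_tally_py items out) := by unfold Spec_tally_py; infer_instance

-- ===== CLAIM (what is proved, stated in full; the proofs are below) =====
def Claim_equal_tally_py : Prop := ∀ (items : List String), Dom_tally_py items → Spec_tally_py items (tally_py items)

-- ===== LEMMAS AND PROOFS =====

-- A's loop over items is the counter loop over the cleaned keys.
theorem tallyA_eq_fold_keys (items : List String) (d : PySem.Dict String Int) :
    items.foldl (fun out it =>
      let key := PySem.Str.strip it
      if key = "" then out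
      else out.insert key (out.getD key 0 + 1)) d
    = ((items.map (fun it => PySem.Str.strip it)).filter (fun k => k ≠ "")).foldl
        (fun out k => out.insert k (out.getD k 0 + 1)) d := by
  induction items generalizing d with
  | nil => rfl
  | cons it t ih =>
      by_cases h : PySem.Str.strip it = "" <;>
        simp [List.foldl_cons, h, ih]

-- keys of B's loop: exactly the distinct keys in first-occurrence order.
theorem Bfold_keys (c : String → Int) (l : List String) (d : PySem.Dict String Int) :
    (l.foldl (fun out k => if out.contains k then out else out.insert k (c k)) d).keys
    = PySem.Set.update d.keys l := by
  induction l generalizing d with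
  | nil => rfl
  | cons k t ih =>
      show (List.foldl _ (if d.contains k then d else d.insert k (c k)) t).keys
        = PySem.Set.update (PySem.Set.add d.keys k) t
      rw [ih]
      by_cases h : d.contains k
      · have hm : k ∈ d.keys := (PySem.Dict.contains_iff_mem_keys d k).mp h
        simp [h, PySem.Set.add, hm]
      · have hm : k ∉ d.keys := fun hk => h ((PySem.Dict.contains_iff_mem_keys d k).mpr hk)
        simp [h, PySem.Set.add, hm, PySem.Dict.keys_insert_of_not_contains d (c k) (by simpa using h)]

-- values of B's loop: every stored key carries c of that key.
theorem Bfold_getD (c : String → Int) (l : List String) (d : PySem.Dict String Int)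
    (hd : ∀ k, d.contains k = true → d.getD k 0 = c k) :
    ∀ k, (l.foldl (fun out k => if out.contains k then out else out.insert k (c k)) d).contains k = true →
      (l.foldl (fun out k => if out.contains k then out else out.insert k (c k)) d).getD k 0 = c k := by
  induction l generalizing d with
  | nil => exact hd
  | cons x t ih =>
      intro k hk
      refine ih (if d.contains x then d else d.insert x (c x)) ?_ k hk
      intro j hj
      by_cases h : d.contains x
      · rw [if_pos h] at hj ⊢; exact hd j hj
      · rw [if_neg h] at hj ⊢
        by_cases hjx : j = x
        · subst hjx; exact PySem.Dict.getD_insert_self d j (c j) 0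
        · rw [PySem.Dict.getD_insert_of_ne d (c x) 0 hjx]
          refine hd j ?_
          have := PySem.Dict.contains_insert d x j (c x)
          rw [hj] at this
          simpa [hjx] using this.symm

-- B's loop preserves key uniqueness.
theorem Bfold_nodup (c : String → Int) (l : List String) (d : PySem.Dict String Int)
    (hd : d.keys.Nodup) :
    (l.foldl (fun out k => if out.contains k then out else out.insert k (c k)) d).keys.Nodup := by
  induction l generalizing d with
  | nil => exact hd
  | cons x t ih =>
      refine ih (if d.contains x then d else d.insert x (c x)) ?_
      by_cases h : d.contains x
      · simpa [h] using hd
      · have hm : x ∉ d.keys := fun hk => h ((PySem.Dict.contains_iff_mem_keys d x).mpr hk)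
        have hkeys' : (d.insert x (c x)).keys = d.keys ++ [x] :=
          PySem.Dict.keys_insert_of_not_contains d (c x) (by simpa using h)
        rw [if_neg h, hkeys']
        refine List.Nodup.append hd (List.nodup_singleton x) ?_
        simpa using hm

-- ===== VERDICT (by name: the statement is the Claim_ definition above) =====
theorem tally_py_spec : Claim_equal_tally_py := by
  intro items _
  show tally_py items = tally_py_alt items
  unfold tally_py tally_py_alt
  set keys := (items.map (fun it => PySem.Str.strip it)).filter (fun k => k ≠ "") with hkeys
  rw [tallyA_eq_fold_keys, PySem.Dict.foldl_insert_getD_add_one_eq_counter,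
    PySem.Dict.items_counter]
  set c : String → Int := fun k => PySem.List.count keys k with hc
  set db := keys.foldl (fun out k => if out.contains k then out else out.insert k (c k))
    PySem.Dict.empty with hdb
  have hnd : db.keys.Nodup := Bfold_nodup c keys PySem.Dict.empty (by simp)
  have hks : db.keys = PySem.Set.ofList keys := by
    rw [hdb, Bfold_keys]; simp [PySem.Set.update, PySem.Set.ofList]
  rw [PySem.Dict.items_eq_map_keys db hnd 0, hks]
  refine (List.map_congr_left ?_).symm
  intro k hk
  have hmem : k ∈ db.keys := by rw [hks]; exact hk
  have hget : db.getD k 0 = c k := by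
    refine Bfold_getD c keys PySem.Dict.empty (by simp) k ?_
    exact (PySem.Dict.contains_iff_mem_keys db k).mpr hmem
  simp [hget, hc, PySem.List.count, hkeys, ne_eq, decide_not]
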